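-- pv_equiv track=rewrite | github.com/hermandejager/dienstrooster- | app.py | _mag_toegewezen
-- ===== SOURCE A (Python) =====
-- def _mag_toegewezen(wordt_gekeken_naam, dienst, vorige_dag, rooster_so_far, max_consec_nacht=2):
--     if not rooster_so_far:
--         return True
--     # vorige dag dict
--     if vorige_dag:
--         # Regel: geen Dagdienst direct na Nachtdienst voor dezelfde persoon
--         if dienst == 'Dagdienst' and vorige_dag.get('Nachtdienst') == wordt_gekeken_naam:
--             return False
--         # Regel: max 2 nachtdiensten op rij
--         if dienst == 'Nachtdienst':
--             # tel achteruit
--             consec = 0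
--             for dag in reversed(rooster_so_far):
--                 if dag.get('Nachtdienst') == wordt_gekeken_naam:
--                     consec += 1
--                 else:
--                     break
--             if consec >= max_consec_nacht:
--                 return False
--     return True
-- ===== SOURCE B (Python) =====
-- def _mag_toegewezen(wordt_gekeken_naam, dienst, vorige_dag, rooster_so_far, max_consec_nacht=2):
--     if not rooster_so_far:
--         return True
--     if vorige_dag:
--         if dienst == 'Dagdienst' and vorige_dag.get('Nachtdienst') == wordt_gekeken_naam:
--             return False
--         if dienst == 'Nachtdienst':
--             # threshold reached iff the window of the last max_consec_nacht days exists
--             # and is entirely this person's Nachtdienst (a non-positive limit forbids any night shift)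
--             if max_consec_nacht <= 0:
--                 return False
--             window = rooster_so_far[-max_consec_nacht:]
--             if len(window) >= max_consec_nacht and all(d.get('Nachtdienst') == wordt_gekeken_naam for d in window):
--                 return False
--     return True
-- ===== Notes on version B (the rewrite author's own statement) =====
-- stated objective: simpler
-- what changed: Replaced A's backward counting loop over the reversed roster (with a counter and early break) by a fixed-window check: the night-shift limit is hit exactly when the last max_consec_nacht scheduled days all carry this person's Nachtdienst; a non-positive limit forbids any night shift directly.
import Mathlib
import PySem

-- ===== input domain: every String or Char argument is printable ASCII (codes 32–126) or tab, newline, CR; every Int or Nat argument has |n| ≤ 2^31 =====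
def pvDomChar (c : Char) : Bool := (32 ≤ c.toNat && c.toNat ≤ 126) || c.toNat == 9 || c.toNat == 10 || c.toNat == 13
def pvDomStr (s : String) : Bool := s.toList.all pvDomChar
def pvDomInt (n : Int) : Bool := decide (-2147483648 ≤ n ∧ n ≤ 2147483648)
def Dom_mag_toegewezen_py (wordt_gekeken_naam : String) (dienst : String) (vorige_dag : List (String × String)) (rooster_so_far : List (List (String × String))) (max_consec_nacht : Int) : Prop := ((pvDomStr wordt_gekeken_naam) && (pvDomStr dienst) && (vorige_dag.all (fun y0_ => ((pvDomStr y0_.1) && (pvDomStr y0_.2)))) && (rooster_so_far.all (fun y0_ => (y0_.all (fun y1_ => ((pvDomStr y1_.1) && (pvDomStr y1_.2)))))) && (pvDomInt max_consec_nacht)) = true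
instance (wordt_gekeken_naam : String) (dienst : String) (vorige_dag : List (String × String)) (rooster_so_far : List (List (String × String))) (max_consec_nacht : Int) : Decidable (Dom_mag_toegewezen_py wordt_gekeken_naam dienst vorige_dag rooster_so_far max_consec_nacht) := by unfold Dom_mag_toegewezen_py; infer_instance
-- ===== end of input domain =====

-- B replaces A's backward counting loop over the whole roster by a fixed-window check on the
-- last max_consec_nacht days (objective: simpler — no counter, no reversed scan, no early break).

-- ===== PORT A =====
-- A's backward loop: count matching days from the end of the roster, stopping at the first mismatch.
def pvConsecNacht (naam : String) : List (List (String × String)) → Nat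
  | [] => 0
  | dag :: rest =>
      if List.lookup "Nachtdienst" dag == some naam then pvConsecNacht naam rest + 1 else 0

def mag_toegewezen_py (wordt_gekeken_naam : String) (dienst : String) (vorige_dag : List (String × String)) (rooster_so_far : List (List (String × String))) (max_consec_nacht : Int) : Bool :=
  if rooster_so_far.isEmpty then true
  else if !vorige_dag.isEmpty then
    if dienst == "Dagdienst" && (List.lookup "Nachtdienst" vorige_dag == some wordt_gekeken_naam) then false
    else if dienst == "Nachtdienst" then
      if ((pvConsecNacht wordt_gekeken_naam rooster_so_far.reverse : Int) ≥ max_consec_nacht) then false else true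
    else true
  else true

-- ===== PORT B =====
def mag_toegewezen_py_alt (wordt_gekeken_naam : String) (dienst : String) (vorige_dag : List (String × String)) (rooster_so_far : List (List (String × String))) (max_consec_nacht : Int) : Bool :=
  if rooster_so_far.isEmpty then true
  else if !vorige_dag.isEmpty then
    if dienst == "Dagdienst" && (List.lookup "Nachtdienst" vorige_dag == some wordt_gekeken_naam) then false
    else if dienst == "Nachtdienst" then
      if max_consec_nacht ≤ 0 then false
      else
        let window := PySem.List.slice rooster_so_far (some (-max_consec_nacht)) none
        if ((window.length : Int) ≥ max_consec_nacht) && window.all (fun dag => List.lookup "Nachtdienst" dag == some wordt_gekeken_naam) then false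
        else true
    else true
  else true

-- ===== PRECONDITION & SPEC =====
def Spec_mag_toegewezen_py (wordt_gekeken_naam : String) (dienst : String) (vorige_dag : List (String × String)) (rooster_so_far : List (List (String × String))) (max_consec_nacht : Int) (out : Bool) : Prop := out = mag_toegewezen_py_alt wordt_gekeken_naam dienst vorige_dag rooster_so_far max_consec_nacht
instance (wordt_gekeken_naam : String) (dienst : String) (vorige_dag : List (String × String)) (rooster_so_far : List (List (String × String))) (max_consec_nacht : Int) (out : Bool) : Decidable (Spec_mag_toegewezen_py wordt_gekeken_naam dienst vorige_dag rooster_so_far max_consec_nacht out) := by unfold Spec_mag_toegewezen_py; infer_instance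

-- ===== CLAIM (what is proved, stated in full; the proofs are below) =====
def Claim_equal_mag_toegewezen_py : Prop := ∀ (wordt_gekeken_naam : String) (dienst : String) (vorige_dag : List (String × String)) (rooster_so_far : List (List (String × String))) (max_consec_nacht : Int), Dom_mag_toegewezen_py wordt_gekeken_naam dienst vorige_dag rooster_so_far max_consec_nacht → Spec_mag_toegewezen_py wordt_gekeken_naam dienst vorige_dag rooster_so_far max_consec_nacht (mag_toegewezen_py wordt_gekeken_naam dienst vorige_dag rooster_so_far max_consec_nacht)

-- ===== LEMMAS AND PROOFS =====

-- A's streak count reaches k iff the first k entries (of the reversed roster) exist and all match.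
theorem pvConsecNacht_ge_iff (naam : String) (l : List (List (String × String))) (k : Nat) :
    k ≤ pvConsecNacht naam l ↔
      k ≤ l.length ∧ (l.take k).all (fun dag => List.lookup "Nachtdienst" dag == some naam) = true := by
  induction l generalizing k with
  | nil =>
    simp [pvConsecNacht]
  | cons x t ih =>
    cases k with
    | zero => simp
    | succ j =>
      by_cases hx : List.lookup "Nachtdienst" x == some naam
      · simp only [pvConsecNacht, hx, if_pos, List.take_succ_cons, List.all_cons,
          Bool.true_and, List.length_cons]
        constructor
        · intro h
          have := (ih j).mp (by omega)
          exact ⟨by omega, this.2⟩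
        · intro ⟨h1, h2⟩
          have := (ih j).mpr ⟨by omega, h2⟩
          omega
      · simp only [pvConsecNacht, hx, List.take_succ_cons, List.all_cons,
          Bool.false_eq_true]
        simp

-- the night-shift branch conditions agree
theorem branch_eq (naam : String) (rs : List (List (String × String))) (mx : Int) :
    (if ((pvConsecNacht naam rs.reverse : Int) ≥ mx) then false else true) =
    (if mx ≤ 0 then false
     else
       let window := PySem.List.slice rs (some (-mx)) none
       if ((window.length : Int) ≥ mx) && window.all (fun dag => List.lookup "Nachtdienst" dag == some naam) then false
       else true) := by
  by_cases hmx : mx ≤ 0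
  · have hge : (pvConsecNacht naam rs.reverse : Int) ≥ mx := le_trans hmx (Int.natCast_nonneg _)
    simp [hmx, hge]
  · have hmx' : 0 < mx := by omega
    have hk : 0 < mx.toNat := by omega
    have hmxk : mx = (mx.toNat : Int) := by omega
    rw [if_neg hmx, hmxk, PySem.List.slice_from_neg_natCast rs mx.toNat hk]
    set k := mx.toNat with hkdef
    have hwin : List.drop (rs.length - k) rs = (rs.reverse.take k).reverse := by
      rw [List.take_reverse, List.reverse_reverse]
    have hiff := pvConsecNacht_ge_iff naam rs.reverse k
    simp only [List.length_reverse] at hiff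
    simp only [hwin, List.all_reverse, List.length_reverse, List.length_take, ge_iff_le]
    by_cases hc : (k : Int) ≤ (pvConsecNacht naam rs.reverse : Int)
    · have hc' : k ≤ pvConsecNacht naam rs.reverse := by exact_mod_cast hc
      obtain ⟨h1, h2⟩ := hiff.mp hc'
      rw [if_pos hc, h2, Bool.and_true, if_pos]
      simp only [decide_eq_true_eq]
      push_cast
      omega
    · rw [if_neg hc]
      have hc' : ¬ (k ≤ rs.length ∧
          ((rs.reverse.take k).all (fun dag => List.lookup "Nachtdienst" dag == some naam)) = true) :=
        fun h => hc (by exact_mod_cast hiff.mpr h)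
      by_cases h1 : k ≤ rs.length
      · have h2 : ((rs.reverse.take k).all (fun dag => List.lookup "Nachtdienst" dag == some naam)) = false := by
          cases hall : ((rs.reverse.take k).all (fun dag => List.lookup "Nachtdienst" dag == some naam)) with
          | true => exact absurd ⟨h1, hall⟩ hc'
          | false => rfl
        rw [h2, Bool.and_false, if_neg (by simp)]
      · rw [if_neg]
        simp only [Bool.and_eq_true, decide_eq_true_eq, not_and]
        intro hlen
        exfalso
        push_cast at hlen
        omega

-- ===== VERDICT (by name: the statement is the Claim_ definition above) =====
theorem mag_toegewezen_py_spec : Claim_equal_mag_toegewezen_py := by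
  intro n d vd rs mx _
  unfold Spec_mag_toegewezen_py mag_toegewezen_py mag_toegewezen_py_alt
  rw [branch_eq n rs mx]
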